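-- pv_equiv track=rewrite | github.com/Dish365/data_collect | backend/analytics/app/analytics/qualitative/thematic_analysis.py | extract_quotes_by_theme
-- ===== SOURCE A (Python) =====
-- from typing import Dict, Any, List, Tuple, Set
--
-- def extract_quotes_by_theme(texts: List[str], theme_keywords: List[str], max_quotes: int = 5) -> List[str]:
--     """
--     Extract representative quotes for a given theme.
--
--     Args:
--         texts: List of text documents
--         theme_keywords: Keywords representing the theme
--         max_quotes: Maximum number of quotes to return
--
--     Returns:
--         List of representative quotes
--     """
--     scored_texts = []
--
--     for text in texts:
--         # Calculate relevance score based on keyword presence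
--         text_lower = text.lower()
--         score = sum(1 for keyword in theme_keywords if keyword.lower() in text_lower)
--
--         if score > 0:
--             scored_texts.append((text, score))
--
--     # Sort by score and return top quotes
--     scored_texts.sort(key=lambda x: x[1], reverse=True)
--     quotes = [text for text, score in scored_texts[:max_quotes]]
--
--     return quotes
-- ===== SOURCE B (Python) =====
-- def extract_quotes_by_theme(texts, theme_keywords, max_quotes=5):
--     # Bucket positive-scored texts by score, then read buckets from the
--     # highest possible score down to 1 (stable, no sort), slice at the end.
--     buckets = {}
--     for text in texts:
--         tl = text.lower()
--         score = sum(1 for k in theme_keywords if k.lower() in tl)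
--         if score > 0:
--             buckets[score] = buckets.get(score, []) + [text]
--     ordered = []
--     for s in range(len(theme_keywords), 0, -1):
--         ordered += buckets.get(s, [])
--     return ordered[:max_quotes]
-- ===== Notes on version B (the rewrite author's own statement) =====
-- stated objective: alternative
-- what changed: Replaced the stable sort-then-slice of scored texts by a score->bucket dictionary built in one pass and read out from the highest possible score down to 1, slicing the concatenated buckets at the end.
import Mathlib
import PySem

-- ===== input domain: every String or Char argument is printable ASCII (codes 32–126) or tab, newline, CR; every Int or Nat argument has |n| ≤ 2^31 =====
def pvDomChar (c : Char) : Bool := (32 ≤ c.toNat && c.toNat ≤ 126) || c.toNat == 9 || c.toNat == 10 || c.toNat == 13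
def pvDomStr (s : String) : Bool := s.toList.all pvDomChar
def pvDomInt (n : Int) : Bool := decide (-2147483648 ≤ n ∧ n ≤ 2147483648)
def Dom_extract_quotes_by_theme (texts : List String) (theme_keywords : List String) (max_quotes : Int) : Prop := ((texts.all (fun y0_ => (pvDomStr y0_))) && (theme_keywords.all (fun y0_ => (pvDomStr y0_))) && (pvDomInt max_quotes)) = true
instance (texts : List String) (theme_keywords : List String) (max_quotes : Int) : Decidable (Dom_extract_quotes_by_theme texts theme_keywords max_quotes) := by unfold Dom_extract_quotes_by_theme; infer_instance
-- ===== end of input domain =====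

-- B replaces A's sort-then-slice by score buckets read from the highest score down (alternative decomposition, same cost).

-- shared helper: the per-text relevance score, computed identically by both Pythons
def pvScore (theme_keywords : List String) (text : String) : Int :=
  let text_lower := PySem.Str.lower text
  theme_keywords.foldl
    (fun s keyword => if PySem.Str.isIn (PySem.Str.lower keyword) text_lower then s + 1 else s) 0

-- ===== PORT A =====
def extract_quotes_by_theme (texts : List String) (theme_keywords : List String) (max_quotes : Int) : List String :=
  let scored_texts : List (String × Int) :=
    texts.foldl (fun acc text =>
      let score := pvScore theme_keywords text
      if score > 0 then acc ++ [(text, score)] else acc) []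
  let sorted := PySem.List.sorted scored_texts (fun x => x.2) true
  (PySem.List.slice sorted none (some max_quotes)).map (fun p => p.1)

-- ===== PORT B =====
def extract_quotes_by_theme_alt (texts : List String) (theme_keywords : List String) (max_quotes : Int) : List String :=
  let buckets : PySem.Dict Int (List String) :=
    texts.foldl (fun b text =>
      let score := pvScore theme_keywords text
      if score > 0 then PySem.Dict.insert b score (PySem.Dict.getD b score [] ++ [text]) else b)
      PySem.Dict.empty
  let ordered :=
    (PySem.List.pyRange (theme_keywords.length : Int) 0 (-1)).foldl
      (fun acc s => acc ++ PySem.Dict.getD buckets s []) []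
  PySem.List.slice ordered none (some max_quotes)

-- ===== PRECONDITION & SPEC =====
def Spec_extract_quotes_by_theme (texts : List String) (theme_keywords : List String) (max_quotes : Int) (out : List String) : Prop := out = extract_quotes_by_theme_alt texts theme_keywords max_quotes
instance (texts : List String) (theme_keywords : List String) (max_quotes : Int) (out : List String) : Decidable (Spec_extract_quotes_by_theme texts theme_keywords max_quotes out) := by unfold Spec_extract_quotes_by_theme; infer_instance

-- ===== CLAIM (what is proved, stated in full; the proofs are below) =====
def Claim_equal_extract_quotes_by_theme : Prop := ∀ (texts : List String) (theme_keywords : List String) (max_quotes : Int), Dom_extract_quotes_by_theme texts theme_keywords max_quotes → Spec_extract_quotes_by_theme texts theme_keywords max_quotes (extract_quotes_by_theme texts theme_keywords max_quotes)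

-- ===== LEMMAS AND PROOFS =====

-- the list A builds: positive-scored texts paired with their score, in input order
def pvScored (theme_keywords : List String) (texts : List String) : List (String × Int) :=
  (texts.filter (fun t => decide ((0:Int) < pvScore theme_keywords t))).map
    (fun t => (t, pvScore theme_keywords t))

-- buckets of score k down to score 1, each in input order
def pvCatD (k : Nat) (xs : List (String × Int)) : List (String × Int) :=
  match k with
  | 0 => []
  | Nat.succ j => xs.filter (fun p => p.2 == ((j : Int) + 1)) ++ pvCatD j xs

theorem pvScore_eq_countP (tk : List String) (t : String) :
    pvScore tk t = ((tk.countP (fun k => PySem.Str.isIn (PySem.Str.lower k) (PySem.Str.lower t))) : Int) := by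
  simpa [pvScore] using
    PySem.List.foldl_if_add_one (fun k => PySem.Str.isIn (PySem.Str.lower k) (PySem.Str.lower t)) tk 0

theorem pvScore_le (tk : List String) (t : String) : pvScore tk t ≤ (tk.length : Int) := by
  rw [pvScore_eq_countP]
  exact_mod_cast List.countP_le_length

theorem pvCatD_nil (k : Nat) : pvCatD k [] = [] := by
  induction k with
  | zero => rfl
  | succ j ih => simp [pvCatD, ih]

theorem mem_pvCatD {k : Nat} {xs : List (String × Int)} {p : String × Int}
    (h : p ∈ pvCatD k xs) : p.2 ≤ (k : Int) := by
  induction k with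
  | zero => simp [pvCatD] at h
  | succ j ih =>
    simp only [pvCatD, List.mem_append] at h
    rcases h with h | h
    · rcases List.mem_filter.mp h with ⟨_, he⟩
      have : p.2 = (j : Int) + 1 := by simpa using he
      simp [this]
    · have := ih h
      push_cast
      omega

theorem pvCatD_append_gt (k : Nat) (xs : List (String × Int)) (x : String × Int)
    (h : (k : Int) < x.2) : pvCatD k (xs ++ [x]) = pvCatD k xs := by
  induction k with
  | zero => rfl
  | succ j ih =>
    have hx : (x.2 == ((j : Int) + 1)) = false := by
      simp only [beq_eq_false_iff_ne, ne_eq]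
      intro he
      push_cast at h
      omega
    have ih' := ih (by push_cast at h ⊢; omega)
    simp [pvCatD, List.filter_append, hx, ih']

theorem insertBy_append_of_not_before {α : Type} (before : α → α → Bool) (x : α)
    (F G : List α) (h : ∀ y ∈ F, before x y = false) :
    PySem.List.insertBy before x (F ++ G) = F ++ PySem.List.insertBy before x G := by
  induction F with
  | nil => simp
  | cons f fs ih =>
    have hf : before x f = false := h f (by simp)
    simp only [List.cons_append, PySem.List.insertBy, hf]
    simp [ih (fun y hy => h y (by simp [hy]))]

theorem insertBy_cons_of_before {α : Type} (before : α → α → Bool) (x : α)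
    (G : List α) (h : ∀ g ∈ G, before x g = true) :
    PySem.List.insertBy before x G = x :: G := by
  cases G with
  | nil => rfl
  | cons g gs => simp [PySem.List.insertBy, h g (by simp)]

theorem insert_pvCatD (k : Nat) (xs : List (String × Int)) (x : String × Int)
    (h1 : 1 ≤ x.2) (h2 : x.2 ≤ (k : Int)) :
    PySem.List.insertBy (fun a b : String × Int => decide (b.2 < a.2)) x (pvCatD k xs)
      = pvCatD k (xs ++ [x]) := by
  induction k with
  | zero => simp at h2; omega
  | succ j ih =>
    by_cases hx : x.2 = (j : Int) + 1
    · -- x belongs to the top bucket: it passes every element of that bucket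
      -- (equal keys) and goes before everything with a smaller key
      have hF : ∀ y ∈ xs.filter (fun p => p.2 == ((j : Int) + 1)),
          (fun a b : String × Int => decide (b.2 < a.2)) x y = false := by
        intro y hy
        rcases List.mem_filter.mp hy with ⟨_, he⟩
        have : y.2 = (j : Int) + 1 := by simpa using he
        simp [this, hx]
      have hG : ∀ g ∈ pvCatD j xs,
          (fun a b : String × Int => decide (b.2 < a.2)) x g = true := by
        intro g hg
        have := mem_pvCatD hg
        simp only [decide_eq_true_eq]
        omega
      rw [pvCatD, insertBy_append_of_not_before _ _ _ _ hF, insertBy_cons_of_before _ _ _ hG]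
      have hfx : (x.2 == ((j : Int) + 1)) = true := by simpa using hx
      rw [pvCatD, List.filter_append, pvCatD_append_gt j xs x (by omega)]
      simp [hfx]
    · -- x has a smaller score: it passes the whole top bucket
      have hxle : x.2 ≤ (j : Int) := by push_cast at h2; omega
      have hF : ∀ y ∈ xs.filter (fun p => p.2 == ((j : Int) + 1)),
          (fun a b : String × Int => decide (b.2 < a.2)) x y = false := by
        intro y hy
        rcases List.mem_filter.mp hy with ⟨_, he⟩
        have : y.2 = (j : Int) + 1 := by simpa using he
        simp only [this, decide_eq_false_iff_not, not_lt]
        omega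
      have hfx : (x.2 == ((j : Int) + 1)) = false := by
        simp only [beq_eq_false_iff_ne, ne_eq]; exact hx
      rw [pvCatD, insertBy_append_of_not_before _ _ _ _ hF, ih hxle]
      simp [pvCatD, List.filter_append, hfx]

theorem sorted_eq_pvCatD (K : Nat) (xs : List (String × Int))
    (h : ∀ p ∈ xs, 1 ≤ p.2 ∧ p.2 ≤ (K : Int)) :
    PySem.List.sorted xs (fun p => p.2) true = pvCatD K xs := by
  rw [PySem.List.sorted_rev_eq_foldl_insertBy]
  induction xs using List.reverseRecOn with
  | nil => simp [pvCatD_nil]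
  | append_singleton ys y ih =>
    have hy := h y (by simp)
    rw [List.foldl_append, List.foldl_cons, List.foldl_nil,
      ih (fun p hp => h p (by simp [hp])), insert_pvCatD K ys y hy.1 hy.2]

-- B's bucket dictionary holds, at each score, exactly that bucket of A's scored list
theorem buckets_getD (tk : List String) (texts : List String) (s : Int) :
    PySem.Dict.getD
      (texts.foldl (fun b text =>
        let score := pvScore tk text
        if score > 0 then PySem.Dict.insert b score (PySem.Dict.getD b score [] ++ [text]) else b)
        PySem.Dict.empty) s []
      = ((pvScored tk texts).filter (fun p => p.2 == s)).map (fun p => p.1) := by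
  induction texts using List.reverseRecOn generalizing s with
  | nil => simp [pvScored, PySem.Dict.getD, PySem.Dict.get?, PySem.Dict.empty]
  | append_singleton ys y ih =>
    rw [List.foldl_append, List.foldl_cons, List.foldl_nil]
    have hsc : pvScored tk (ys ++ [y]) =
        pvScored tk ys ++ if (0:Int) < pvScore tk y then [(y, pvScore tk y)] else [] := by
      simp only [pvScored, List.filter_append, List.map_append]
      by_cases h : (0:Int) < pvScore tk y <;> simp [h]
    by_cases h : (0:Int) < pvScore tk y
    · simp only [gt_iff_lt, h, if_true]
      rw [PySem.Dict.getD_insert, hsc, ih]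
      by_cases he : s = pvScore tk y
      · simp [he, h, List.filter_append, List.map_append]
      · have : ((pvScore tk y) == s) = false := by
          simp only [beq_eq_false_iff_ne, ne_eq]; exact fun hh => he hh.symm
        simp [he, h, List.filter_append, this]
        exact ih s
    · simp only [gt_iff_lt, h, if_false]
      rw [ih, hsc]
      simp [h]

theorem pyRange_desc (K : Nat) :
    PySem.List.pyRange (K : Int) 0 (-1) = (List.range K).map (fun (j : Nat) => (K : Int) - (j : Int)) := by
  cases K with
  | zero => simp [PySem.List.pyRange]
  | succ n =>
    have hs' : (0:Int) < (((n+1:Nat)):Int) := by positivity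
    have hc : (((((n+1:Nat)):Int) - 0 + -(-1) - 1) / -(-1)).toNat = n + 1 := by
      push_cast; norm_num
    simp only [PySem.List.pyRange, if_neg (by norm_num : ¬((-1:Int) = 0)),
      if_neg (by norm_num : ¬((0:Int) < -1)), if_pos hs', hc]
    apply List.map_congr_left
    intro a _
    omega

theorem ordered_eq_map_fst_pvCatD (K : Nat) (xs : List (String × Int)) :
    (PySem.List.pyRange (K : Int) 0 (-1)).flatMap
      (fun s => (xs.filter (fun p => p.2 == s)).map (fun p => p.1))
      = (pvCatD K xs).map (fun p => p.1) := by
  induction K with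
  | zero => simp [PySem.List.pyRange, pvCatD]
  | succ j ih =>
    rw [pyRange_desc] at ih ⊢
    rw [List.range_succ_eq_map]
    simp only [List.map_cons, List.map_map, List.flatMap_cons]
    have h2 : (List.range j).map ((fun (j1 : Nat) => (((j+1:Nat)) : Int) - (j1 : Int)) ∘ Nat.succ)
        = (List.range j).map (fun (j1 : Nat) => (j : Int) - (j1 : Int)) := by
      apply List.map_congr_left
      intro a _
      simp only [Function.comp_apply]
      push_cast
      ring
    rw [h2, ih, pvCatD, List.map_append]
    have h3 : (((j+1:Nat)) : Int) - ((0:Nat) : Int) = (j : Int) + 1 := by push_cast; ring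
    rw [h3]

theorem map_slice_to (xs : List (String × Int)) (m : Int) :
    (PySem.List.slice xs none (some m)).map (fun p => p.1)
      = PySem.List.slice (xs.map (fun p => p.1)) none (some m) := by
  by_cases hm : 0 ≤ m
  · rw [PySem.List.slice_to _ hm, PySem.List.slice_to _ hm, List.map_take]
  · have hk : 0 < (-m).toNat := by omega
    have hmm : m = -(((-m).toNat : Nat) : Int) := by omega
    rw [hmm, PySem.List.slice_to_neg_natCast _ _ hk, PySem.List.slice_to_neg_natCast _ _ hk,
      List.map_take, List.length_map]

-- ===== VERDICT (by name: the statement is the Claim_ definition above) =====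
theorem extract_quotes_by_theme_spec : Claim_equal_extract_quotes_by_theme := by
  intro texts tk m _
  unfold Spec_extract_quotes_by_theme extract_quotes_by_theme extract_quotes_by_theme_alt
  simp only []
  have hsc : texts.foldl (fun acc text =>
      let score := pvScore tk text
      if score > 0 then acc ++ [(text, score)] else acc) [] = pvScored tk texts := by
    simpa [pvScored] using
      PySem.List.foldl_append_ite (fun t => (0:Int) < pvScore tk t)
        (fun t => (t, pvScore tk t)) texts []
  have hbound : ∀ p ∈ pvScored tk texts, 1 ≤ p.2 ∧ p.2 ≤ (tk.length : Int) := by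
    intro p hp
    rcases List.mem_map.mp hp with ⟨t, ht, rfl⟩
    have h0 : (0:Int) < pvScore tk t := by
      have := (List.mem_filter.mp ht).2
      simpa using this
    exact ⟨by omega, pvScore_le tk t⟩
  rw [hsc, sorted_eq_pvCatD tk.length _ hbound, map_slice_to]
  congr 1
  rw [PySem.List.foldl_append_eq_flatMap]
  simp only [List.nil_append]
  have : ∀ s : Int, PySem.Dict.getD
      (texts.foldl (fun b text =>
        let score := pvScore tk text
        if score > 0 then PySem.Dict.insert b score (PySem.Dict.getD b score [] ++ [text]) else b)
        PySem.Dict.empty) s []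
      = ((pvScored tk texts).filter (fun p => p.2 == s)).map (fun p => p.1) :=
    buckets_getD tk texts
  rw [List.flatMap_congr (fun s _ => this s)]
  exact (ordered_eq_map_fst_pvCatD tk.length (pvScored tk texts)).symm
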